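-- pv_equiv track=rewrite | github.com/mcmhav/suchBazar | statsMakers/eventCountDistributions.py | sortCountOnKS
-- ===== SOURCE A (Python) =====
-- def sortCountOnKS(ks,counts,cap):
--     ks = sorted(ks,reverse=True)
--     counts = sorted(counts)
--     tmp_count = []
--     for c in counts:
--         if c > cap:
--             continue
--         tmp_count.append(c)
--     ks = ks[:len(tmp_count)]
--
--     return ks,tmp_count
-- ===== SOURCE B (Python) =====
-- def sortCountOnKS(ks, counts, cap):
--     sorted_counts = sorted(counts)
--     # binary search (textbook bisect_right): first index whose value exceeds cap
--     lo, hi = 0, len(sorted_counts)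
--     while lo < hi:
--         mid = (lo + hi) // 2
--         if cap < sorted_counts[mid]:
--             hi = mid
--         else:
--             lo = mid + 1
--     tmp_count = sorted_counts[:lo]
--     return sorted(ks, reverse=True)[:lo], tmp_count
-- ===== Notes on version B (the rewrite author's own statement) =====
-- stated objective: alternative
-- what changed: B replaces A's linear scan-and-append filter over the sorted counts by a binary search (bisect_right) for the cut point and a single prefix slice, relying on the counts being sorted ascending.
import Mathlib
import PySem

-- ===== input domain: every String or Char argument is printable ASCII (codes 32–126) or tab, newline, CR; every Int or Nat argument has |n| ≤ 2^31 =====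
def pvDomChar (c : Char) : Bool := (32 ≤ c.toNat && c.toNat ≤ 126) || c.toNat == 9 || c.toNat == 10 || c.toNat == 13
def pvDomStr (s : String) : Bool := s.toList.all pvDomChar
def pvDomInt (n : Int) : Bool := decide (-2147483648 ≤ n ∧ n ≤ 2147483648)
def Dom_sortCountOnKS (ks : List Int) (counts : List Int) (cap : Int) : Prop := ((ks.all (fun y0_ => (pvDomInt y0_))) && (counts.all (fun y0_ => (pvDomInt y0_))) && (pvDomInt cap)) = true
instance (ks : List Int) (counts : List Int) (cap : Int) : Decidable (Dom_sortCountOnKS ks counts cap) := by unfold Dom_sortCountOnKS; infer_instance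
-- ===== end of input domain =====

-- B computes the kept counts as a prefix of the ascending sort found by binary search (bisect_right)
-- instead of A's linear scan-and-append filter; equivalence is proved on the whole domain.


-- ===== PORT A =====
def sortCountOnKS (ks : List Int) (counts : List Int) (cap : Int) : List Int × List Int :=
  let ks1 := PySem.List.sorted ks (fun x => x) true
  let counts1 := PySem.List.sorted counts (fun x => x)
  let tmp_count := counts1.foldl (fun acc c => if cap < c then acc else acc ++ [c]) []
  -- ks[:len(tmp_count)] : the bound is a nonnegative length, so the slice is exactly `take`
  (ks1.take tmp_count.length, tmp_count)

-- ===== PORT B =====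
-- Source B's hand-written lo/hi loop is the textbook bisect_right; PySem.List.bisectRight is
-- exactly that binary-search loop (lo=0, hi=len, mid=(lo+hi)//2, 'if cap < a[mid]').
def sortCountOnKS_alt (ks : List Int) (counts : List Int) (cap : Int) : List Int × List Int :=
  let sorted_counts := PySem.List.sorted counts (fun x => x)
  let lo := PySem.List.bisectRight sorted_counts cap
  -- the two slices [:lo] have a nonnegative bound, so they are exactly `take`
  ((PySem.List.sorted ks (fun x => x) true).take lo, sorted_counts.take lo)

-- ===== PRECONDITION & SPEC =====
def Spec_sortCountOnKS (ks : List Int) (counts : List Int) (cap : Int) (out : List Int × List Int) : Prop := out = sortCountOnKS_alt ks counts cap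
instance (ks : List Int) (counts : List Int) (cap : Int) (out : List Int × List Int) : Decidable (Spec_sortCountOnKS ks counts cap out) := by unfold Spec_sortCountOnKS; infer_instance

-- ===== CLAIM (what is proved, stated in full; the proofs are below) =====
def Claim_equal_sortCountOnKS : Prop := ∀ (ks : List Int) (counts : List Int) (cap : Int), Dom_sortCountOnKS ks counts cap → Spec_sortCountOnKS ks counts cap (sortCountOnKS ks counts cap)

-- ===== LEMMAS AND PROOFS =====

-- On a list whose first r elements are ≤ cap and whose remaining elements are > cap,
-- filtering by (· ≤ cap) is the same as taking the first r elements.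
theorem filter_eq_take_of_split (cap : Int) :
    ∀ (l : List Int) (r : Nat), r ≤ l.length →
      (∀ (j : Nat) (hj : j < l.length), j < r → l[j] ≤ cap) →
      (∀ (j : Nat) (hj : j < l.length), r ≤ j → cap < l[j]) →
      l.filter (fun c => decide (c ≤ cap)) = l.take r := by
  intro l
  induction l with
  | nil => intro r _ _ _; simp
  | cons x t ih =>
    intro r hr h2 h3
    cases r with
    | zero =>
      have hall : ∀ a ∈ x :: t, ¬ (decide (a ≤ cap) = true) := by
        intro a ha
        obtain ⟨j, hj, rfl⟩ := List.mem_iff_getElem.mp ha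
        have := h3 j hj (Nat.zero_le j)
        simp; omega
      simp [List.filter_eq_nil_iff.mpr hall]
    | succ s =>
      have hx : x ≤ cap := h2 0 (by simp) (Nat.succ_pos s)
      have h2' : ∀ (j : Nat) (hj : j < t.length), j < s → t[j] ≤ cap := by
        intro j hj hlt
        have := h2 (j + 1) (by simpa using Nat.succ_lt_succ hj) (Nat.succ_lt_succ hlt)
        simpa using this
      have h3' : ∀ (j : Nat) (hj : j < t.length), s ≤ j → cap < t[j] := by
        intro j hj hle
        have := h3 (j + 1) (by simpa using Nat.succ_lt_succ hj) (Nat.succ_le_succ hle)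
        simpa using this
      have := ih s (by simpa using Nat.succ_le_succ_iff.mp hr) h2' h3'
      simp [hx, this]

-- ===== VERDICT (by name: the statement is the Claim_ definition above) =====
theorem sortCountOnKS_spec : Claim_equal_sortCountOnKS := by
  intro ks counts cap _
  unfold Spec_sortCountOnKS sortCountOnKS sortCountOnKS_alt
  simp only
  have hbody : ∀ (acc : List Int) (c : Int), c ∈ PySem.List.sorted counts (fun x => x) →
      (if cap < c then acc else acc ++ [c]) = (if c ≤ cap then acc ++ [c] else acc) := by
    intro acc c _
    rcases lt_or_ge cap c with h | h
    · simp [h, not_le.mpr h]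
    · simp [not_lt.mpr h, h]
  rw [PySem.List.foldl_congr_mem _ _ _ _ hbody,
      PySem.List.foldl_append_ite_eq_filter (p := fun c => c ≤ cap)]
  have hsorted : (PySem.List.sorted counts (fun x => x)).Pairwise (fun a b => a ≤ b) :=
    PySem.List.sorted_pairwise counts (fun x => x)
  obtain ⟨hle, hlt, hgt⟩ := PySem.List.bisectRight_spec (PySem.List.sorted counts (fun x => x)) cap hsorted
  have hft := filter_eq_take_of_split cap (PySem.List.sorted counts (fun x => x))
      (PySem.List.bisectRight (PySem.List.sorted counts (fun x => x)) cap) hle hlt hgt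
  have hle' : PySem.List.bisectRight (PySem.List.sorted counts (fun x => x)) cap ≤ counts.length := by
    simpa [PySem.List.length_sorted] using hle
  simp [hft, List.length_take]
  omega
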